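-- pv_equiv track=rewrite | github.com/ZJUAAA/ZJUAAA.github.io | maintain/update_tutorial_html.py | findOuterUL
-- ===== SOURCE A (Python) =====
-- def findOuterUL(content):
--     start, end = 0, 0
--     n = len(content)
--     for i in range(n):
--         if "<ul" in content[i]:
--             start = i
--             break
--     for i in range(n):
--         if "</ul>" in content[n-i-1]:
--             end = n-i-1
--             break
--     return start, end
-- ===== SOURCE B (Python) =====
-- def findOuterUL(content):
--     start, end, found = 0, 0, False
--     for i, line in enumerate(content):
--         if not found and "<ul" in line:
--             start, found = i, True
--         if "</ul>" in line:
--             end = i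
--     return start, end
-- ===== Notes on version B (the rewrite author's own statement) =====
-- stated objective: alternative
-- what changed: Replaced A's two separate break-on-first-match scans (one forward for '<ul', one backward for '</ul>') with a single forward enumerate pass that sets start once under a found flag and keeps overwriting end on every '</ul>' match.
import Mathlib
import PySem

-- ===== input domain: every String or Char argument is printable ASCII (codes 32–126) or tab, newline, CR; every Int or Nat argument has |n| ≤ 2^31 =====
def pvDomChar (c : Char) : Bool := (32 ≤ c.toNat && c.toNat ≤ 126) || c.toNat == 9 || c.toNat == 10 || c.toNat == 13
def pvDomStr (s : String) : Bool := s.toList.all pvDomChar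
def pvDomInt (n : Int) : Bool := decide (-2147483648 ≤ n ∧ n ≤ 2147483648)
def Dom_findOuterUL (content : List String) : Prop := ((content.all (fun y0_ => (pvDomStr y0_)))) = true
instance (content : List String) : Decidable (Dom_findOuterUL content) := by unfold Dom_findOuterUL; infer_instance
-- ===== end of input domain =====

-- B replaces A's two separate break-loops (forward for the first '<ul', backward for the
-- last '</ul>') with a single forward enumerate pass (alternative decomposition, same cost).

-- ===== PORT A =====
-- first loop: 'for i in range(n): if "<ul" in content[i]: start = i; break' — scans the
-- list front to back carrying the running index i
def findOuterUL_startScan : List String → Int → Int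
  | [], _ => 0
  | s :: rest, i => if PySem.Str.isIn "<ul" s then i else findOuterUL_startScan rest (i + 1)

-- second loop: 'for i in range(n): if "</ul>" in content[n-i-1]: end = n-i-1; break' —
-- visits content[n-1], content[n-2], …, i.e. content.reverse, carrying the index n-i-1
def findOuterUL_endScan : List String → Int → Int
  | [], _ => 0
  | s :: rest, j => if PySem.Str.isIn "</ul>" s then j else findOuterUL_endScan rest (j - 1)

def findOuterUL (content : List String) : Int × Int :=
  (findOuterUL_startScan content 0,
   findOuterUL_endScan content.reverse ((content.length : Int) - 1))

-- ===== PORT B =====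
-- loop body of Source B: state (i, found, start, end); one enumerate step
def findOuterUL_altStep (acc : Int × Bool × Int × Int) (line : String) : Int × Bool × Int × Int :=
  let (i, found, start, e) := acc
  ((i + 1),
   (found || PySem.Str.isIn "<ul" line),
   (if !found && PySem.Str.isIn "<ul" line then i else start),
   (if PySem.Str.isIn "</ul>" line then i else e))

def findOuterUL_alt (content : List String) : Int × Int :=
  let r := content.foldl findOuterUL_altStep (0, false, 0, 0)
  (r.2.2.1, r.2.2.2)

-- ===== PRECONDITION & SPEC =====
def Spec_findOuterUL (content : List String) (out : Int × Int) : Prop := out = findOuterUL_alt content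
instance (content : List String) (out : Int × Int) : Decidable (Spec_findOuterUL content out) := by unfold Spec_findOuterUL; infer_instance

-- ===== CLAIM (what is proved, stated in full; the proofs are below) =====
def Claim_equal_findOuterUL : Prop := ∀ (content : List String), Dom_findOuterUL content → Spec_findOuterUL content (findOuterUL content)

-- ===== LEMMAS AND PROOFS =====

-- the 'end' accumulator of B's fold, on its own
def lastEnd : List String → Int → Int → Int
  | [], _, en => en
  | s :: rest, i, en => lastEnd rest (i + 1) (if PySem.Str.isIn "</ul>" s then i else en)

theorem startScan_of_not_any (l : List String) (i : Int)
    (h : ¬ l.any (fun s => PySem.Str.isIn "<ul" s) = true) : findOuterUL_startScan l i = 0 := by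
  induction l generalizing i with
  | nil => rfl
  | cons s rest ih =>
    simp only [List.any_cons, Bool.or_eq_true, not_or] at h
    rw [findOuterUL_startScan, if_neg h.1]
    exact ih _ h.2

theorem endScan_of_not_any (l : List String) (j : Int)
    (h : ¬ l.any (fun s => PySem.Str.isIn "</ul>" s) = true) : findOuterUL_endScan l j = 0 := by
  induction l generalizing j with
  | nil => rfl
  | cons s rest ih =>
    simp only [List.any_cons, Bool.or_eq_true, not_or] at h
    rw [findOuterUL_endScan, if_neg h.1]
    exact ih _ h.2

theorem lastEnd_append (l : List String) (s : String) (i en : Int) :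
    lastEnd (l ++ [s]) i en
      = (if PySem.Str.isIn "</ul>" s then i + l.length else lastEnd l i en) := by
  induction l generalizing i en with
  | nil => simp [lastEnd]
  | cons t rest ih =>
    simp only [List.cons_append, lastEnd, ih, List.length_cons]
    split_ifs <;> first | rfl | (push_cast; ring)

theorem lastEnd_eq_endScan (l : List String) (i en : Int) :
    lastEnd l i en
      = (if l.any (fun s => PySem.Str.isIn "</ul>" s)
          then findOuterUL_endScan l.reverse (i + l.length - 1) else en) := by
  induction l using List.reverseRecOn generalizing i en with
  | nil => simp [lastEnd]
  | append_singleton rest s ih =>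
    rw [lastEnd_append]
    simp only [List.reverse_append, List.reverse_singleton, List.singleton_append,
      List.any_append, List.any_cons, List.any_nil, Bool.or_false,
      findOuterUL_endScan, List.length_append, List.length_singleton]
    cases hs : PySem.Str.isIn "</ul>" s with
    | true =>
      simp only [Bool.or_true, if_true]
      push_cast; ring
    | false =>
      simp only [Bool.or_false, Bool.false_eq_true, if_false, ih]
      by_cases hr : rest.any (fun t => PySem.Str.isIn "</ul>" t) = true
      · rw [if_pos hr, if_pos hr]; congr 1; push_cast; ring
      · rw [if_neg hr, if_neg hr]

-- B's fold once found = true: start stays frozen, end behaves like lastEnd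
theorem fold_found (l : List String) (i st en : Int) :
    l.foldl findOuterUL_altStep (i, true, st, en)
      = (i + l.length, true, st, lastEnd l i en) := by
  induction l generalizing i en with
  | nil => simp [lastEnd]
  | cons s rest ih =>
    simp only [List.foldl_cons, findOuterUL_altStep, Bool.true_or, Bool.not_true,
      Bool.false_and, Bool.false_eq_true, if_false, ih, lastEnd, List.length_cons]
    simp only [Prod.mk.injEq, and_true]
    omega

-- B's fold while found = false
theorem fold_not_found (l : List String) (i st en : Int) :
    l.foldl findOuterUL_altStep (i, false, st, en)
      = (i + l.length,
         l.any (fun s => PySem.Str.isIn "<ul" s),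
         (if l.any (fun s => PySem.Str.isIn "<ul" s) then findOuterUL_startScan l i else st),
         lastEnd l i en) := by
  induction l generalizing i st en with
  | nil => simp [lastEnd]
  | cons s rest ih =>
    cases hs : PySem.Str.isIn "<ul" s with
    | true =>
      simp only [List.foldl_cons, findOuterUL_altStep, hs, Bool.not_false, Bool.true_and,
        Bool.or_true, reduceIte, fold_found, List.any_cons, Bool.true_or, List.length_cons,
        lastEnd, findOuterUL_startScan]
      simp only [Prod.mk.injEq, and_true]
      omega
    | false =>
      simp only [List.foldl_cons, findOuterUL_altStep, hs, Bool.not_false, Bool.true_and,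
        Bool.false_eq_true, if_false, Bool.or_false, ih, List.any_cons,
        Bool.false_or, List.length_cons, lastEnd, findOuterUL_startScan]
      simp only [Prod.mk.injEq, and_true]
      omega

-- ===== VERDICT (by name: the statement is the Claim_ definition above) =====
theorem findOuterUL_spec : Claim_equal_findOuterUL := by
  intro content _
  show findOuterUL content = findOuterUL_alt content
  simp only [findOuterUL, findOuterUL_alt, fold_not_found, lastEnd_eq_endScan, zero_add]
  by_cases hP : content.any (fun s => PySem.Str.isIn "<ul" s) = true
  · rw [if_pos hP]
    by_cases hQ : content.any (fun s => PySem.Str.isIn "</ul>" s) = true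
    · rw [if_pos hQ]
    · rw [if_neg hQ, endScan_of_not_any _ _ (by rwa [List.any_reverse])]
  · rw [if_neg hP, startScan_of_not_any _ _ hP]
    by_cases hQ : content.any (fun s => PySem.Str.isIn "</ul>" s) = true
    · rw [if_pos hQ]
    · rw [if_neg hQ, endScan_of_not_any _ _ (by rwa [List.any_reverse])]
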